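-- pv_equiv track=rewrite | github.com/pisterlabs/promptset | data/scraping-2.0/repos/crim-ca~pavics-jupyter-images/nlp~notebooks~nl2query~V2~Vdb_simsearch.py | generate_ngrams
-- ===== SOURCE A (Python) =====
-- def generate_ngrams(text, max_words):
--     words = text.split()
--     output = []
--     ngrams_dict = {}
--     for x in range(1,max_words+1):
--         for i in range(len(words)- x+1):
--             ngram = " ".join(words[i:i+x])
--             output.append(ngram)
--             # add 1-grams
--             ngrams_dict[ngram] = words[i:i+x]
--             # add 2-grams in case of 3-gram and more
--             if x >= 2:
--                 for j in range(0, len(ngrams_dict[ngram])-1):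
--                     ngrams_dict[ngram].append(" ".join(words[i+j:i+j+2]))
--     return output, ngrams_dict
-- ===== SOURCE B (Python) =====
-- def generate_ngrams(text, max_words):
--     words = text.split()
--     output = []
--     ngrams_dict = {}
--     # level x holds, per starting position, the triple (ngram string, its words, its bigrams),
--     # each obtained from level x-1 by appending one word -- no slicing or re-joining per window
--     level = [(w, [w], []) for w in words]
--     x = 1
--     while x <= max_words and level:
--         for s, ws, bs in level:
--             output.append(s)
--             ngrams_dict[s] = ws + bs
--         level = [(s + " " + w, ws + [w], bs + [ws[-1] + " " + w])
--                  for (s, ws, bs), w in zip(level, words[x:])]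
--         x += 1
--     return output, ngrams_dict
-- ===== Notes on version B (the rewrite author's own statement) =====
-- stated objective: faster
-- what changed: B replaces A's slice-and-join enumeration (each window's string and every bigram re-joined from scratch, the bigrams via an inner dict-mutation loop) with a level-by-level dynamic programming pass: a list of (ngram, words, bigrams) triples for length x is extended to length x+1 by appending one word, one list element and one bigram per position via zip, with early exit when the level runs out.
import Mathlib
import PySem

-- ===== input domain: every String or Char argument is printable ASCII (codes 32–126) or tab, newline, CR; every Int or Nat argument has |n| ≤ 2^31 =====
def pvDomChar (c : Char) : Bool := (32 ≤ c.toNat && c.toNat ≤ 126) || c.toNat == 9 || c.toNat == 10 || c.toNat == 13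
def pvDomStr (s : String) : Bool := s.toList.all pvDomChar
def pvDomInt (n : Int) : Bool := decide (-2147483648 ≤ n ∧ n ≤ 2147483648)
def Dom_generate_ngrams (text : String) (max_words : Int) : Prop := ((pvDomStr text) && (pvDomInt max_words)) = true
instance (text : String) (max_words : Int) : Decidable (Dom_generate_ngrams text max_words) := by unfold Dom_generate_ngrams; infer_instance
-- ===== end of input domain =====

-- B replaces A's slice-and-join enumeration (each window's string and bigrams re-joined from
-- scratch, the bigrams in an inner dict-mutation loop) by a level DP: a list of
-- (ngram, words, bigrams) triples for length x is extended to length x+1 by appending one word,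
-- one list element and one bigram per position via zip, exiting early when the level empties.
-- Objective: faster (constant factor, measured: no per-window re-joins,
-- no per-bigram dict mutation).

-- ===== PORT A =====
def generate_ngrams (text : String) (max_words : Int) : List String × (List (String × List String)) :=
  let words := PySem.Str.split₀ text
  let st :=
    (PySem.List.pyRange 1 (max_words + 1)).foldl
      (fun (st : List String × PySem.Dict String (List String)) x =>
        (PySem.List.pyRange 0 ((words.length : Int) - x + 1)).foldl
          (fun st i =>
            let ngram := PySem.Str.join " " (PySem.List.slice words (some i) (some (i + x)))
            let output := st.1 ++ [ngram]
            let d := st.2.insert ngram (PySem.List.slice words (some i) (some (i + x)))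
            let d :=
              if 2 ≤ x then
                (PySem.List.pyRange 0 (((d.getD ngram []).length : Int) - 1)).foldl
                  (fun d j =>
                    d.modify ngram []
                      (fun v => v ++ [PySem.Str.join " " (PySem.List.slice words (some (i + j)) (some (i + j + 2)))]))
                  d
              else d
            (output, d))
          st)
      ([], PySem.Dict.empty)
  (st.1, st.2.items)

-- ===== PORT B =====
-- one level extension: zip the level with words[x:], append one word and one bigram per triple
-- (ws[-1] is ported as pyGetD ws (-1) ""; ws is never empty, so the default is never used)
def pvExtend (words : List String) (x : Int)
    (level : List (String × List String × List String)) :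
    List (String × List String × List String) :=
  (level.zip (PySem.List.slice words (some x) none)).map
    (fun p => (p.1.1 ++ " " ++ p.2, p.1.2.1 ++ [p.2],
               p.1.2.2 ++ [PySem.List.pyGetD p.1.2.1 (-1) "" ++ " " ++ p.2]))

-- the while loop: fuel = number of remaining x-iterations (x ≤ max_words), early exit on empty level
def pvLoopB (words : List String) : Nat → Int →
    List (String × List String × List String) → List String →
    PySem.Dict String (List String) → List String × PySem.Dict String (List String)
  | 0, _, _, out, d => (out, d)
  | Nat.succ fuel, x, level, out, d =>
    if level.isEmpty then (out, d)
    else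
      let st := level.foldl
        (fun (st : List String × PySem.Dict String (List String)) t =>
          (st.1 ++ [t.1], st.2.insert t.1 (t.2.1 ++ t.2.2))) (out, d)
      pvLoopB words fuel (x + 1) (pvExtend words x level) st.1 st.2

def generate_ngrams_alt (text : String) (max_words : Int) : List String × (List (String × List String)) :=
  let words := PySem.Str.split₀ text
  let level := words.map (fun w => (w, [w], ([] : List String)))
  let st := pvLoopB words max_words.toNat 1 level [] PySem.Dict.empty
  (st.1, st.2.items)

-- ===== PRECONDITION & SPEC =====
def Spec_generate_ngrams (text : String) (max_words : Int) (out : List String × (List (String × List String))) : Prop := out = generate_ngrams_alt text max_words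
instance (text : String) (max_words : Int) (out : List String × (List (String × List String))) : Decidable (Spec_generate_ngrams text max_words out) := by unfold Spec_generate_ngrams; infer_instance

-- ===== CLAIM (what is proved, stated in full; the proofs are below) =====
def Claim_equal_generate_ngrams : Prop := ∀ (text : String) (max_words : Int), Dom_generate_ngrams text max_words → Spec_generate_ngrams text max_words (generate_ngrams text max_words)

-- ===== LEMMAS AND PROOFS =====

-- proof-side abbreviations: the joined window, its words, its bigrams, the uniform step,
-- the window list for x ∈ [a,b), and the level B maintains at a given x
def pvG (words : List String) (x i : Int) : String :=
  PySem.Str.join " " (PySem.List.slice words (some i) (some (i + x)))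

def pvWs (words : List String) (x i : Int) : List String :=
  PySem.List.slice words (some i) (some (i + x))

def pvBs (words : List String) (x i : Int) : List String :=
  (PySem.List.pyRange 0 (x - 1)).map
    (fun j => PySem.Str.join " " (PySem.List.slice words (some (i + j)) (some (i + j + 2))))

def pvStep (words : List String) (st : List String × PySem.Dict String (List String))
    (p : Int × Int) : List String × PySem.Dict String (List String) :=
  (st.1 ++ [pvG words p.1 p.2],
   st.2.insert (pvG words p.1 p.2) (pvWs words p.1 p.2 ++ pvBs words p.1 p.2))

def pvWins (words : List String) (a b : Int) : List (Int × Int) :=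
  (PySem.List.pyRange a b).flatMap
    (fun x => (PySem.List.pyRange 0 ((words.length : Int) - x + 1)).map (fun i => (x, i)))

def pvLevelAt (words : List String) (x : Int) : List (String × List String × List String) :=
  (PySem.List.pyRange 0 ((words.length : Int) - x + 1)).map
    (fun i => (pvG words x i, pvWs words x i, pvBs words x i))

theorem pv_insert_modify {κ ν : Type} [BEq κ] [LawfulBEq κ] (d : PySem.Dict κ ν) (k : κ)
    (v d0 : ν) (f : ν → ν) : (d.insert k v).modify k d0 f = d.insert k (f v) := by
  simp [PySem.Dict.modify, PySem.Dict.getD_insert_self, PySem.Dict.insert_insert_self]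

-- collapsing A's inner j-loop of appends into one insert of the final value
theorem pv_fold_modify_append {κ ν : Type} [BEq κ] [LawfulBEq κ] (m : ℕ)
    (d : PySem.Dict κ (List ν)) (k : κ) (w : List ν) (f : Int → ν) :
    (PySem.List.pyRange 0 (m : Int)).foldl
        (fun d j => d.modify k [] (fun v => v ++ [f j])) (d.insert k w)
      = d.insert k (w ++ (PySem.List.pyRange 0 (m : Int)).map f) := by
  induction m with
  | zero => simp [PySem.List.pyRange_one_eq_nil]
  | succ m ih =>
      have h : ((m + 1 : ℕ) : Int) = (m : Int) + 1 := by push_cast; ring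
      rw [h, PySem.List.pyRange_one_succ_right (by exact_mod_cast Nat.zero_le m)]
      simp [List.foldl_append, ih, pv_insert_modify]

-- length of a window slice
theorem pv_win_length {α : Type} (words : List α) (i x : Int) (h0 : 0 ≤ i) (h1 : 1 ≤ x)
    (h2 : i + x ≤ (words.length : Int)) :
    (PySem.List.slice words (some i) (some (i + x))).length = x.toNat := by
  rw [PySem.List.slice_toNat words h0 (by omega)]
  simp only [List.length_take, List.length_drop]
  omega

-- one window of A's loop body equals the uniform insert step
theorem pv_body (words : List String) (x i : Int) (hx : 1 ≤ x) (h0 : 0 ≤ i)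
    (h2 : i + x ≤ (words.length : Int)) (st : List String × PySem.Dict String (List String)) :
    (st.1 ++ [PySem.Str.join " " (PySem.List.slice words (some i) (some (i + x)))],
      if 2 ≤ x then
        (PySem.List.pyRange 0
            ((((st.2.insert (PySem.Str.join " " (PySem.List.slice words (some i) (some (i + x))))
                  (PySem.List.slice words (some i) (some (i + x)))).getD
                (PySem.Str.join " " (PySem.List.slice words (some i) (some (i + x)))) []).length : Int) - 1)).foldl
          (fun d j =>
            d.modify (PySem.Str.join " " (PySem.List.slice words (some i) (some (i + x)))) []
              (fun v => v ++ [PySem.Str.join " " (PySem.List.slice words (some (i + j)) (some (i + j + 2)))]))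
          (st.2.insert (PySem.Str.join " " (PySem.List.slice words (some i) (some (i + x))))
            (PySem.List.slice words (some i) (some (i + x))))
      else
        st.2.insert (PySem.Str.join " " (PySem.List.slice words (some i) (some (i + x))))
          (PySem.List.slice words (some i) (some (i + x))))
    = pvStep words st (x, i) := by
  simp only [pvStep, pvG, pvWs, pvBs]
  rw [PySem.Dict.getD_insert_self, pv_win_length words i x h0 hx h2]
  by_cases hx2 : 2 ≤ x
  · rw [if_pos hx2]
    have hm : ((x.toNat : ℕ) : Int) - 1 = (((x - 1).toNat : ℕ) : Int) := by omega
    rw [hm, pv_fold_modify_append]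
    have hm2 : ((((x - 1).toNat : ℕ)) : Int) = x - 1 := by omega
    rw [hm2]
  · rw [if_neg hx2]
    have hx1 : x = 1 := by omega
    subst hx1
    have : PySem.List.pyRange 0 ((1 : Int) - 1) = [] := by
      simp [PySem.List.pyRange_one_eq_nil]
    rw [this]
    simp

-- A's nested loop is a single fold of the uniform step over the window list
theorem pv_A_fold (words : List String) (mw : Int) :
    (PySem.List.pyRange 1 (mw + 1)).foldl
        (fun (st : List String × PySem.Dict String (List String)) x =>
          (PySem.List.pyRange 0 ((words.length : Int) - x + 1)).foldl
            (fun st i =>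
              (st.1 ++ [PySem.Str.join " " (PySem.List.slice words (some i) (some (i + x)))],
                if 2 ≤ x then
                  (PySem.List.pyRange 0
                      ((((st.2.insert (PySem.Str.join " " (PySem.List.slice words (some i) (some (i + x))))
                            (PySem.List.slice words (some i) (some (i + x)))).getD
                          (PySem.Str.join " " (PySem.List.slice words (some i) (some (i + x)))) []).length : Int) - 1)).foldl
                    (fun d j =>
                      d.modify (PySem.Str.join " " (PySem.List.slice words (some i) (some (i + x)))) []
                        (fun v => v ++ [PySem.Str.join " " (PySem.List.slice words (some (i + j)) (some (i + j + 2)))]))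
                    (st.2.insert (PySem.Str.join " " (PySem.List.slice words (some i) (some (i + x))))
                      (PySem.List.slice words (some i) (some (i + x))))
                else
                  st.2.insert (PySem.Str.join " " (PySem.List.slice words (some i) (some (i + x))))
                    (PySem.List.slice words (some i) (some (i + x)))))
            st)
        ([], PySem.Dict.empty)
      = (pvWins words 1 (mw + 1)).foldl (pvStep words) ([], PySem.Dict.empty) := by
  unfold pvWins
  rw [List.foldl_flatMap]
  apply PySem.List.foldl_congr_mem
  intro st x hx
  rw [List.foldl_map]
  apply PySem.List.foldl_congr_mem
  intro st' i hi
  have hx1 : 1 ≤ x := (PySem.List.mem_pyRange_one.mp hx).1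
  have hi' := PySem.List.mem_pyRange_one.mp hi
  exact pv_body words x i hx1 hi'.1 (by omega) st'

-- join over a list extended by one element (Chars level, then String level)
theorem pv_chars_join_append (sep w : List Char) (l : List (List Char)) (h : l ≠ []) :
    PySem.Chars.join sep (l ++ [w]) = PySem.Chars.join sep l ++ sep ++ w := by
  induction l with
  | nil => exact absurd rfl h
  | cons a t ih =>
      cases t with
      | nil => simp [PySem.Chars.join_cons_cons, PySem.Chars.join_singleton]
      | cons b t2 =>
          have ih' := ih (by simp)
          rw [List.cons_append] at ih'
          rw [List.cons_append, List.cons_append, PySem.Chars.join_cons_cons, ih',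
            PySem.Chars.join_cons_cons]
          simp [List.append_assoc]

theorem pv_str_join_append (l : List String) (w : String) (h : l ≠ []) :
    PySem.Str.join " " (l ++ [w]) = PySem.Str.join " " l ++ " " ++ w := by
  apply String.toList_inj.mp
  simp only [String.toList_append, PySem.Str.toList_join, List.map_append, List.map_cons,
    List.map_nil]
  exact pv_chars_join_append _ _ _ (by simp [h])

theorem pv_str_join_singleton (w : String) : PySem.Str.join " " [w] = w := by
  apply String.toList_inj.mp
  simp only [PySem.Str.toList_join, List.map_cons, List.map_nil]
  exact PySem.Chars.join_singleton _ _

-- a one-element window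
theorem pv_slice_one (words : List String) (i : Nat) (h : i < words.length) :
    PySem.List.slice words (some (i : Int)) (some ((i : Int) + 1)) = [words[i]] := by
  have h1 : ((i : Int) + 1) = (i : Int) + ((1 : Nat) : Int) := by push_cast; ring
  rw [h1, PySem.List.slice_natCast_add, List.drop_eq_getElem_cons h]
  rfl

-- extending a window by one word on the right
theorem pv_slice_succ (words : List String) (i x : Nat) (h : i + x < words.length) :
    PySem.List.slice words (some (i : Int)) (some ((i : Int) + (x : Int) + 1))
      = PySem.List.slice words (some (i : Int)) (some ((i : Int) + (x : Int))) ++ [words[i + x]] := by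
  have h1 : ((i : Int) + (x : Int) + 1) = (i : Int) + ((x + 1 : Nat) : Int) := by push_cast; ring
  have h2 : ((i : Int) + (x : Int)) = (i : Int) + ((x : Nat) : Int) := by ring
  rw [h1, h2, PySem.List.slice_natCast_add, PySem.List.slice_natCast_add, List.take_add_one]
  have h3 : (words.drop i)[x]? = some words[i + x] := by
    rw [List.getElem?_drop]
    exact List.getElem?_eq_getElem (by omega)
  simp [h3]

-- a two-element window, joined
theorem pv_join_pair (words : List String) (k : Nat) (h : k + 1 < words.length) :
    PySem.Str.join " " (PySem.List.slice words (some (k : Int)) (some ((k : Int) + 2)))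
      = words[k] ++ " " ++ words[k + 1] := by
  have h1 : ((k : Int) + 2) = (k : Int) + ((1 : Nat) : Int) + 1 := by push_cast; ring
  have h2 : ((k : Int) + ((1 : Nat) : Int)) = (k : Int) + 1 := by push_cast; ring
  rw [h1, pv_slice_succ words k 1 h, h2, pv_slice_one words k (by omega),
    pv_str_join_append _ _ (by simp), pv_str_join_singleton]

-- the window's words are never empty
theorem pv_ws_ne_nil (words : List String) (i x : Nat) (hx : 1 ≤ x) (h : i + x ≤ words.length) :
    pvWs words (x : Int) (i : Int) ≠ [] := by
  have : (pvWs words (x : Int) (i : Int)).length = x := by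
    unfold pvWs
    rw [pv_win_length words _ _ (by positivity) (by exact_mod_cast hx) (by omega)]
    omega
  intro hnil
  rw [hnil] at this
  simp at this
  omega

-- the last word of a window
theorem pv_ws_last (words : List String) (i x : Nat) (hx : 1 ≤ x) (h : i + x ≤ words.length) :
    PySem.List.pyGetD (pvWs words (x : Int) (i : Int)) (-1) "" = words[i + x - 1]'(by omega) := by
  rw [PySem.List.pyGetD_neg_one _ _ (pv_ws_ne_nil words i x hx h), List.getLast_eq_getElem]
  have hws : pvWs words (x : Int) (i : Int) = (words.drop i).take x := by
    unfold pvWs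
    rw [PySem.List.slice_natCast_add]
  simp only [hws, List.length_take, List.length_drop, List.getElem_take, List.getElem_drop]
  congr 1
  omega

-- the three per-position equalities of one DP extension step
theorem pv_comp_ws (words : List String) (i x : Nat) (h : i + x < words.length) :
    pvWs words (x : Int) (i : Int) ++ [words[i + x]'h]
      = pvWs words ((x : Int) + 1) (i : Int) := by
  unfold pvWs
  rw [show ((i : Int) + ((x : Int) + 1)) = (i : Int) + (x : Int) + 1 from by ring,
    pv_slice_succ words i x h]

theorem pv_comp_g (words : List String) (i x : Nat) (hx : 1 ≤ x) (h : i + x < words.length) :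
    pvG words (x : Int) (i : Int) ++ " " ++ words[i + x]'h
      = pvG words ((x : Int) + 1) (i : Int) := by
  unfold pvG
  rw [show ((i : Int) + ((x : Int) + 1)) = (i : Int) + (x : Int) + 1 from by ring,
    pv_slice_succ words i x h,
    pv_str_join_append (PySem.List.slice words (some (i : Int)) (some ((i : Int) + (x : Int))))
      _ (pv_ws_ne_nil words i x hx (by omega))]

theorem pv_comp_bs (words : List String) (i x : Nat) (hx : 1 ≤ x) (h : i + x < words.length) :
    pvBs words (x : Int) (i : Int)
        ++ [PySem.List.pyGetD (pvWs words (x : Int) (i : Int)) (-1) "" ++ " " ++ words[i + x]'h]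
      = pvBs words ((x : Int) + 1) (i : Int) := by
  unfold pvBs
  have hx1 : (x : Int) - 1 = ((x - 1 : Nat) : Int) := by omega
  have h1 : (x : Int) + 1 - 1 = ((x - 1 : Nat) : Int) + 1 := by omega
  rw [hx1, h1, PySem.List.pyRange_one_succ_right (by positivity), List.map_append,
    List.map_cons, List.map_nil]
  congr 2
  have h2 : (i : Int) + ((x - 1 : Nat) : Int) = ((i + x - 1 : Nat) : Int) := by omega
  rw [h2, pv_join_pair words (i + x - 1) (by omega), pv_ws_last words i x hx (by omega)]
  congr 2
  omega

-- the DP extension is exact: one zip-map step turns the level for x into the level for x+1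
theorem pv_extend_level (words : List String) (x : Int) (hx : 1 ≤ x) :
    pvExtend words x (pvLevelAt words x) = pvLevelAt words (x + 1) := by
  lift x to ℕ using (by omega : (0 : Int) ≤ x)
  have hx' : 1 ≤ x := by exact_mod_cast hx
  unfold pvExtend pvLevelAt
  rw [PySem.List.slice_from words (by positivity)]
  apply List.ext_getElem
  · simp only [List.length_map, List.length_zip, PySem.List.length_pyRange_one,
      List.length_drop]
    omega
  · intro k h1 h2
    simp only [List.getElem_map, List.getElem_zip, List.getElem_drop,
      PySem.List.getElem_pyRange_one, zero_add, Int.toNat_natCast]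
    have hk : k + x < words.length := by
      simp only [List.length_map, List.length_zip, PySem.List.length_pyRange_one,
        List.length_drop] at h1
      omega
    simp only [Nat.add_comm x k]
    exact Prod.ext (by rw [← pv_comp_g words k x hx' hk])
      (Prod.ext (by rw [← pv_comp_ws words k x hk]) (by rw [← pv_comp_bs words k x hx' hk]))

-- the level is empty exactly when no window of length x fits
theorem pv_level_empty (words : List String) (x : Int) :
    (pvLevelAt words x).isEmpty = true ↔ (words.length : Int) - x + 1 ≤ 0 := by
  unfold pvLevelAt
  rw [List.isEmpty_iff, List.map_eq_nil_iff]
  constructor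
  · intro h
    have := congrArg List.length h
    simp only [PySem.List.length_pyRange_one, List.length_nil] at this
    omega
  · intro h
    exact PySem.List.pyRange_one_eq_nil (by omega)

-- no windows at all once x exceeds the word count
theorem pv_wins_nil (words : List String) (a b : Int) (h : (words.length : Int) + 1 ≤ a) :
    pvWins words a b = [] := by
  unfold pvWins
  rw [List.flatMap_eq_nil_iff]
  intro x hx
  rw [List.map_eq_nil_iff]
  exact PySem.List.pyRange_one_eq_nil (by
    have := (PySem.List.mem_pyRange_one.mp hx).1
    omega)

-- B's while loop is the fold of the uniform step over the windows it has yet to visit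
theorem pv_B_fold (words : List String) (fuel : Nat) :
    ∀ (x : Int) (out : List String) (d : PySem.Dict String (List String)), 1 ≤ x →
    pvLoopB words fuel x (pvLevelAt words x) out d
      = (pvWins words x (x + fuel)).foldl (pvStep words) (out, d) := by
  induction fuel with
  | zero =>
      intro x out d hx
      unfold pvWins
      rw [PySem.List.pyRange_one_eq_nil (by omega)]
      rfl
  | succ fuel ih =>
      intro x out d hx
      by_cases hemp : (pvLevelAt words x).isEmpty
      · rw [pv_wins_nil words x _ (by have := (pv_level_empty words x).mp hemp; omega)]
        simp [pvLoopB, hemp]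
      · rw [pvLoopB]
        rw [if_neg hemp]
        have hbody :
            (pvLevelAt words x).foldl
                (fun (st : List String × PySem.Dict String (List String)) t =>
                  (st.1 ++ [t.1], st.2.insert t.1 (t.2.1 ++ t.2.2))) (out, d)
              = ((PySem.List.pyRange 0 ((words.length : Int) - x + 1)).map
                  (fun i => (x, i))).foldl (pvStep words) (out, d) := by
          unfold pvLevelAt
          rw [List.foldl_map, List.foldl_map]
          rfl
        rw [hbody, pv_extend_level words x hx, ih (x + 1) _ _ (by omega)]
        have hsplit : pvWins words x (x + (fuel + 1 : Nat))
            = (PySem.List.pyRange 0 ((words.length : Int) - x + 1)).map (fun i => (x, i))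
              ++ pvWins words (x + 1) ((x + 1) + fuel) := by
          unfold pvWins
          have hb : x + ((fuel + 1 : Nat) : Int) = (x + 1) + ((fuel : Nat) : Int) := by
            push_cast; ring
          rw [hb, PySem.List.pyRange_one_cons (by omega), List.flatMap_cons]
        rw [hsplit, List.foldl_append]

-- the initial level is the level for x = 1
theorem pv_level_one (words : List String) :
    words.map (fun w => (w, [w], ([] : List String))) = pvLevelAt words 1 := by
  unfold pvLevelAt
  apply List.ext_getElem
  · simp only [List.length_map, PySem.List.length_pyRange_one]
    omega
  · intro k h1 h2
    simp only [List.getElem_map, PySem.List.getElem_pyRange_one, zero_add]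
    have hk : k < words.length := by simpa using h1
    have e1 : pvWs words (1 : Int) (k : Int) = [words[k]] := by
      unfold pvWs
      exact pv_slice_one words k hk
    have e2 : pvG words (1 : Int) (k : Int) = words[k] := by
      unfold pvG
      rw [show pvWs words (1 : Int) (k : Int)
            = PySem.List.slice words (some (k : Int)) (some ((k : Int) + 1)) from rfl] at e1
      rw [e1, pv_str_join_singleton]
    have e3 : pvBs words (1 : Int) (k : Int) = [] := by
      unfold pvBs
      rw [show (1 : Int) - 1 = 0 from by ring, PySem.List.pyRange_one_eq_nil le_rfl]
      rfl
    rw [e1, e2, e3]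

-- ===== VERDICT (by name: the statement is the Claim_ definition above) =====
theorem generate_ngrams_spec : Claim_equal_generate_ngrams := by
  intro text mw _
  simp only [Spec_generate_ngrams, generate_ngrams, generate_ngrams_alt]
  rw [pv_A_fold (PySem.Str.split₀ text) mw, pv_level_one (PySem.Str.split₀ text),
    pv_B_fold (PySem.Str.split₀ text) mw.toNat 1 [] PySem.Dict.empty le_rfl]
  have hr : pvWins (PySem.Str.split₀ text) 1 (mw + 1)
      = pvWins (PySem.Str.split₀ text) 1 (1 + (mw.toNat : Int)) := by
    unfold pvWins
    rcases le_or_gt (0:Int) mw with h | h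
    · rw [show mw + 1 = 1 + (mw.toNat : Int) from by omega]
    · rw [PySem.List.pyRange_one_eq_nil (by omega), PySem.List.pyRange_one_eq_nil (by omega)]
  rw [hr]
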